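-- pv_equiv track=rewrite | github.com/danielzak555/magshimim_all_hw | Network/Semester B/homework_8/test3.py | shift_odd_indices_back
-- ===== SOURCE A (Python) =====
-- def shift_odd_indices_back(text, shift):
--     result = ""
--     for i, char in enumerate(text):
--         if i % 2 == 0 and char.isalpha():
--             shifted = chr(((ord(char.lower()) - ord('a') - shift) % 26) + ord('a'))
--             result += shifted.upper() if char.isupper() else shifted
--         else:
--             result += char
--     return result
-- ===== SOURCE B (Python) =====
-- def shift_odd_indices_back(text, shift):
--     def back(ch):
--         if ch.isalpha():
--             s = chr(((ord(ch.lower()) - ord('a') - shift) % 26) + ord('a'))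
--             return s.upper() if ch.isupper() else s
--         return ch
--
--     evens = [back(c) for c in text[::2]]
--     odds = list(text[1::2])
--     out = []
--     for e, o in zip(evens, odds):
--         out.append(e)
--         out.append(o)
--     if len(odds) < len(evens):
--         out.append(evens[-1])
--     return "".join(out)
-- ===== Notes on version B (the rewrite author's own statement) =====
-- stated objective: alternative
-- what changed: Instead of one enumerate pass testing i % 2 per character, B strides: it Caesar-back-shifts the even-index slice text[::2], keeps text[1::2] unchanged, and interleaves the two slices (re-appending the trailing even character for odd lengths).
import Mathlib
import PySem

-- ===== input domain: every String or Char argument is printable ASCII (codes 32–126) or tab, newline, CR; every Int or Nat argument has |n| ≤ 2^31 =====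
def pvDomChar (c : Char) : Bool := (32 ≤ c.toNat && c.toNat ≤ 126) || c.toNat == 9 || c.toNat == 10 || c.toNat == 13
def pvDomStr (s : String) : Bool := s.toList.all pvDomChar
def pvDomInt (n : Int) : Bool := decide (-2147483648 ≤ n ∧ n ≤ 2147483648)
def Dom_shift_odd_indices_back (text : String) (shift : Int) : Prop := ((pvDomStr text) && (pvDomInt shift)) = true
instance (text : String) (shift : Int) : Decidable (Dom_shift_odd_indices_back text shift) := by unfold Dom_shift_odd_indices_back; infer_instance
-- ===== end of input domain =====

-- B recomputes the same result by striding: Caesar-shift the even-index slice text[::2],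
-- keep text[1::2], and interleave the two (objective: alternative decomposition, same cost).

-- ===== PORT A =====
-- literal port of A: one pass over enumerate(text), shifting even-index letters (ord('a') = 97)
def shift_odd_indices_back (text : String) (shift : Int) : String :=
  String.ofList <|
    (PySem.List.enumerate text.toList 0).foldl
      (fun result p =>
        if PySem.Int.mod p.1 2 == 0 && PySem.Chars.isalpha p.2 then
          let shifted := Char.ofNat ((PySem.Int.mod (((PySem.Chars.lowerChar p.2).toNat : Int) - 97 - shift) 26) + 97).toNat
          result ++ [if PySem.Chars.isupper p.2 then PySem.Chars.upperChar shifted else shifted]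
        else
          result ++ [p.2])
      []

-- ===== PORT B =====
-- Source B's helper back(ch): Caesar-back-shift a letter, preserving case
def pvBack (shift : Int) (ch : Char) : Char :=
  if PySem.Chars.isalpha ch then
    let s := Char.ofNat ((PySem.Int.mod (((PySem.Chars.lowerChar ch).toNat : Int) - 97 - shift) 26) + 97).toNat
    if PySem.Chars.isupper ch then PySem.Chars.upperChar s else s
  else ch

-- literal port of Source B: evens = text[::2] mapped through back, odds = text[1::2], zip-interleave,
-- then append evens[-1] when the even slice is the longer one
def shift_odd_indices_back_alt (text : String) (shift : Int) : String :=
  let evens := ((PySem.List.slice? text.toList none none 2).getD []).map (pvBack shift)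
  let odds  := (PySem.List.slice? text.toList (some 1) none 2).getD []
  let out   := (evens.zip odds).foldl (fun acc p => acc ++ [p.1, p.2]) []
  let out   := if odds.length < evens.length then out ++ [PySem.List.pyGetD evens (-1) ' '] else out
  String.ofList out

-- ===== PRECONDITION & SPEC =====
def Spec_shift_odd_indices_back (text : String) (shift : Int) (out : String) : Prop := out = shift_odd_indices_back_alt text shift
instance (text : String) (shift : Int) (out : String) : Decidable (Spec_shift_odd_indices_back text shift out) := by unfold Spec_shift_odd_indices_back; infer_instance

-- ===== CLAIM (what is proved, stated in full; the proofs are below) =====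
def Claim_equal_shift_odd_indices_back : Prop := ∀ (text : String) (shift : Int), Dom_shift_odd_indices_back text shift → Spec_shift_odd_indices_back text shift (shift_odd_indices_back text shift)

-- ===== LEMMAS AND PROOFS =====

-- every-other-element ("stride 2") of a list, two-step structural recursion
def pvEO {α : Type} : List α → List α
  | [] => []
  | [a] => [a]
  | a :: _ :: t => a :: pvEO t

theorem pvEO_cons {α : Type} (x : α) (t : List α) : pvEO (x :: t) = x :: pvEO t.tail := by
  cases t <;> rfl

theorem pvEO_strided {α : Type} (xs : List α) :
    (List.range ((xs.length + 1) / 2)).filterMap (fun k => xs[2 * k]?) = pvEO xs := by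
  induction xs using pvEO.induct with
  | case1 => simp [pvEO]
  | case2 a => simp [pvEO]
  | case3 a b t ih =>
    have hlen : (((a :: b :: t).length + 1) / 2) = (t.length + 1) / 2 + 1 := by
      simp [List.length]; omega
    rw [hlen, List.range_succ_eq_map, List.filterMap_cons, List.filterMap_map]
    have : ((fun k => (a :: b :: t)[2 * k]?) ∘ Nat.succ) = (fun k => t[2 * k]?) := by
      funext k
      have : 2 * Nat.succ k = (2 * k + 1) + 1 := by omega
      simp [this, List.getElem?_cons_succ]
    rw [this, ih]
    rfl

theorem pvSlice2_none (xs : List Char) :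
    (PySem.List.slice? xs none none 2).getD [] = pvEO xs := by
  rw [← pvEO_strided]
  simp [PySem.List.slice?, PySem.List.sliceIndices]
  have hc : (if 0 < xs.length then (((xs.length : Int) + 2 - 1) / 2).toNat else 0) = (xs.length + 1) / 2 := by
    split_ifs with h <;> omega
  rw [hc]
  apply List.filterMap_congr
  intro k _
  have : (2 * (k : Int)).toNat = 2 * k := by omega
  rw [this]

theorem pvSlice2_one (xs : List Char) :
    (PySem.List.slice? xs (some 1) none 2).getD [] = pvEO xs.tail := by
  cases xs with
  | nil => rfl
  | cons a t =>
    rw [show (a :: t).tail = t from rfl, ← pvEO_strided]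
    simp [PySem.List.slice?, PySem.List.sliceIndices]
    have hc : (if 0 < t.length then (((t.length : Int) + 2 - 1) / 2).toNat else 0) = (t.length + 1) / 2 := by
      split_ifs with h <;> omega
    rw [hc]
    apply List.filterMap_congr
    intro k _
    have h1 : (1 + 2 * (k : Int)).toNat = 2 * k + 1 := by omega
    rw [h1, List.getElem?_cons_succ]

-- B's interleave, in flatMap form
def pvCmb (es os : List Char) : List Char :=
  (es.zip os).flatMap (fun p => [p.1, p.2]) ++
    (if os.length < es.length then [PySem.List.pyGetD es (-1) ' '] else [])

theorem pvGetD_neg_one_cons (x : Char) (es : List Char) (h : es ≠ []) :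
    PySem.List.pyGetD (x :: es) (-1) ' ' = PySem.List.pyGetD es (-1) ' ' := by
  cases es with
  | nil => simp at h
  | cons e es' => simp [PySem.List.pyGetD, PySem.List.pyGet?, PySem.List.pyIdx?]; rfl

theorem pvCmb_cons (x y : Char) (es os : List Char) :
    pvCmb (x :: es) (y :: os) = x :: y :: pvCmb es os := by
  unfold pvCmb
  simp only [List.zip_cons_cons, List.flatMap_cons, List.length_cons, add_lt_add_iff_right,
    List.cons_append, List.append_assoc]
  congr 2
  split_ifs with h
  · rw [pvGetD_neg_one_cons x es (by intro he; subst he; simp at h)]; simp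
  · rfl

-- A's per-position output value
def pvStep (shift : Int) (p : Int × Char) : Char :=
  if PySem.Int.mod p.1 2 == 0 && PySem.Chars.isalpha p.2 then
    let shifted := Char.ofNat ((PySem.Int.mod (((PySem.Chars.lowerChar p.2).toNat : Int) - 97 - shift) 26) + 97).toNat
    if PySem.Chars.isupper p.2 then PySem.Chars.upperChar shifted else shifted
  else p.2

theorem pvStep_even (shift s : Int) (a : Char) (h : PySem.Int.mod s 2 = 0) :
    pvStep shift (s, a) = pvBack shift a := by
  have hdvd : (2:Int) ∣ s := by
    rw [PySem.Int.mod_eq_emod_of_pos (by norm_num)] at h; omega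
  simp [pvStep, pvBack, hdvd]

theorem pvStep_odd (shift s : Int) (b : Char) (h : PySem.Int.mod s 2 = 0) :
    pvStep shift (s + 1, b) = b := by
  have h2 : ¬ (2:Int) ∣ (s + 1) := by
    rw [PySem.Int.mod_eq_emod_of_pos (by norm_num)] at h; omega
  simp [pvStep, h2]

theorem pvMain (shift : Int) (l : List Char) :
    ∀ s : Int, PySem.Int.mod s 2 = 0 →
      (PySem.List.enumerate l s).map (pvStep shift) =
        pvCmb ((pvEO l).map (pvBack shift)) (pvEO l.tail) := by
  induction l using pvEO.induct with
  | case1 => intro s hs; rfl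
  | case2 a =>
    intro s hs
    simp [PySem.List.enumerate_cons, PySem.List.enumerate_nil, pvEO, pvCmb,
      pvStep_even shift s a hs, PySem.List.pyGetD, PySem.List.pyGet?, PySem.List.pyIdx?]
  | case3 a b t ih =>
    intro s hs
    have hs2 : PySem.Int.mod (s + 1 + 1) 2 = 0 := by
      rw [PySem.Int.mod_eq_emod_of_pos (by norm_num)] at hs ⊢; omega
    rw [PySem.List.enumerate_cons, PySem.List.enumerate_cons]
    simp only [List.map_cons]
    rw [pvStep_even shift s a hs, pvStep_odd shift s b hs, ih (s + 1 + 1) hs2]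
    show _ = pvCmb ((a :: pvEO t).map (pvBack shift)) (pvEO (b :: t))
    rw [pvEO_cons b t, List.map_cons, pvCmb_cons]

-- ===== VERDICT (by name: the statement is the Claim_ definition above) =====
theorem shift_odd_indices_back_spec : Claim_equal_shift_odd_indices_back := by
  intro text shift _
  unfold Spec_shift_odd_indices_back shift_odd_indices_back shift_odd_indices_back_alt
  have hstep : (fun (result : List Char) (p : Int × Char) =>
      if PySem.Int.mod p.1 2 == 0 && PySem.Chars.isalpha p.2 then
        let shifted := Char.ofNat ((PySem.Int.mod (((PySem.Chars.lowerChar p.2).toNat : Int) - 97 - shift) 26) + 97).toNat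
        result ++ [if PySem.Chars.isupper p.2 then PySem.Chars.upperChar shifted else shifted]
      else result ++ [p.2])
      = (fun (result : List Char) (p : Int × Char) => result ++ [pvStep shift p]) := by
    funext result p
    simp only [pvStep]
    split <;> rfl
  rw [hstep]
  simp only [PySem.List.foldl_append_eq_flatMap, List.nil_append,
    pvSlice2_none, pvSlice2_one]
  rw [← List.map_eq_flatMap, pvMain shift text.toList 0 (by decide)]
  unfold pvCmb
  split <;> simp
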